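-- pv_equiv track=rewrite | github.com/CodyLiska/intelligent_tts_system | app/utils/srt.py | srt_from_durations
-- ===== SOURCE A (Python) =====
-- from typing import List
--
-- def _fmt(ts_ms: int) -> str:
--     ts = ts_ms // 1000
--     ms = ts_ms % 1000
--     h = ts // 3600
--     m = (ts % 3600) // 60
--     s = ts % 60
--     return f"{h:02}:{m:02}:{s:02},{ms:03}"
--
-- def srt_from_durations(sentences: List[str], durations_ms: List[int]) -> str:
--     lines = []
--     t = 0
--     for i, (text, dur) in enumerate(zip(sentences, durations_ms), start=1):
--         start = _fmt(t)
--         end = _fmt(t + dur)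
--         lines.append(str(i))
--         lines.append(f"{start} --> {end}")
--         lines.append(text)
--         lines.append("")
--         t += dur
--     return "\n".join(lines)
-- ===== SOURCE B (Python) =====
-- from itertools import accumulate
-- from typing import List
--
-- def _fmt(ts_ms: int) -> str:
--     ts = ts_ms // 1000
--     ms = ts_ms % 1000
--     h = ts // 3600
--     m = (ts % 3600) // 60
--     s = ts % 60
--     return f"{h:02}:{m:02}:{s:02},{ms:03}"
--
-- def srt_from_durations(sentences: List[str], durations_ms: List[int]) -> str:
--     n = min(len(sentences), len(durations_ms))
--     starts = list(accumulate(durations_ms[:n], initial=0))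
--     blocks = [
--         f"{i + 1}\n{_fmt(starts[i])} --> {_fmt(starts[i] + durations_ms[i])}\n{sentences[i]}\n"
--         for i in range(n)
--     ]
--     return "\n".join(blocks)
-- ===== Notes on version B (the rewrite author's own statement) =====
-- stated objective: alternative
-- what changed: A threads a running time accumulator and a flat 4-lines-per-block list through one enumerate loop; B first builds a prefix-sum table of start offsets (itertools.accumulate) over the truncated durations, then emits one pre-joined block string per index in a separate range pass.
import Mathlib
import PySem

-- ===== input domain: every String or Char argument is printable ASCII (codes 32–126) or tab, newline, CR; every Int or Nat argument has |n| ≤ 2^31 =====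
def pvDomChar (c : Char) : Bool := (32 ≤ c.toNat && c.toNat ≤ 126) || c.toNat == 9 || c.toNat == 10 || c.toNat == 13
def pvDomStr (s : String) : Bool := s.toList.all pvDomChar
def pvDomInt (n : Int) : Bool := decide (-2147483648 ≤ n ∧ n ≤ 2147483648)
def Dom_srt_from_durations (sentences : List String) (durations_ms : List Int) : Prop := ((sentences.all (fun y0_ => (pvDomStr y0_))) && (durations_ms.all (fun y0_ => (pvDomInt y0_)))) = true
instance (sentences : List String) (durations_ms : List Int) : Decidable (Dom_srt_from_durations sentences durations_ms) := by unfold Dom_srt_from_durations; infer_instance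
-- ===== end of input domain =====

-- B replaces A's single loop threading a running time accumulator by a prefix-sum table of
-- start offsets followed by an independent per-index block-emission pass (objective: alternative).

-- ===== PORT A =====
-- _fmt: `//` and `%` are Python floor division / modulo; f"{n:02}" on an int equals str(n).zfill(2)
def pvFmt (ts_ms : Int) : String :=
  let ts := PySem.Int.floordiv ts_ms 1000
  let ms := PySem.Int.mod ts_ms 1000
  let h := PySem.Int.floordiv ts 3600
  let m := PySem.Int.floordiv (PySem.Int.mod ts 3600) 60
  let s := PySem.Int.mod ts 60
  PySem.Str.zfill (PySem.Int.toStr h) 2 ++ ":" ++ PySem.Str.zfill (PySem.Int.toStr m) 2 ++ ":" ++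
    PySem.Str.zfill (PySem.Int.toStr s) 2 ++ "," ++ PySem.Str.zfill (PySem.Int.toStr ms) 3

-- the body of A's for-loop, state = (lines, t)
def srtA_step (st : List String × Int) (p : Int × (String × Int)) : List String × Int :=
  let i := p.1
  let text := p.2.1
  let dur := p.2.2
  let start := pvFmt st.2
  let end_ := pvFmt (st.2 + dur)
  (st.1 ++ [PySem.Int.toStr i, start ++ " --> " ++ end_, text, ""], st.2 + dur)

def srt_from_durations (sentences : List String) (durations_ms : List Int) : String :=
  PySem.Str.join "\n"
    (((PySem.List.enumerate (sentences.zip durations_ms) 1).foldl srtA_step ([], 0)).1)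

-- ===== PORT B =====
-- durations_ms[:n] with 0 ≤ n is List.take n; accumulate(xs, initial=0) is scanl (+) 0;
-- starts[i], durations_ms[i], sentences[i] are always in range (i < n), so getD is exact.
def srt_from_durations_alt (sentences : List String) (durations_ms : List Int) : String :=
  let n := min sentences.length durations_ms.length
  let starts := (durations_ms.take n).scanl (· + ·) 0
  let blocks := (List.range n).map (fun (i : Nat) =>
    PySem.Int.toStr ((i : Int) + 1) ++ "\n" ++
    pvFmt (starts.getD i 0) ++ " --> " ++ pvFmt (starts.getD i 0 + durations_ms.getD i 0) ++ "\n" ++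
    sentences.getD i "" ++ "\n")
  PySem.Str.join "\n" blocks

-- ===== PRECONDITION & SPEC =====
def Spec_srt_from_durations (sentences : List String) (durations_ms : List Int) (out : String) : Prop := out = srt_from_durations_alt sentences durations_ms
instance (sentences : List String) (durations_ms : List Int) (out : String) : Decidable (Spec_srt_from_durations sentences durations_ms out) := by unfold Spec_srt_from_durations; infer_instance

-- ===== CLAIM (what is proved, stated in full; the proofs are below) =====
def Claim_equal_srt_from_durations : Prop := ∀ (sentences : List String) (durations_ms : List Int), Dom_srt_from_durations sentences durations_ms → Spec_srt_from_durations sentences durations_ms (srt_from_durations sentences durations_ms)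

-- ===== LEMMAS AND PROOFS =====

-- the flat line list A's loop produces from remaining pairs, counter i, time t
def pvLinesA : List (String × Int) → Int → Int → List String
  | [], _, _ => []
  | (text, dur) :: rest, i, t =>
      PySem.Int.toStr i :: (pvFmt t ++ " --> " ++ pvFmt (t + dur)) :: text :: "" ::
        pvLinesA rest (i + 1) (t + dur)

-- the per-block strings, one per pair
def pvBlocksL : List (String × Int) → Int → Int → List String
  | [], _, _ => []
  | (text, dur) :: rest, i, t =>
      (PySem.Int.toStr i ++ "\n" ++ pvFmt t ++ " --> " ++ pvFmt (t + dur) ++ "\n" ++ text ++ "\n") ::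
        pvBlocksL rest (i + 1) (t + dur)

theorem pvFoldA (pairs : List (String × Int)) :
    ∀ (i t : Int) (lines : List String),
    ((PySem.List.enumerate pairs i).foldl srtA_step (lines, t)).1 = lines ++ pvLinesA pairs i t := by
  induction pairs with
  | nil => intro i t lines; simp [PySem.List.enumerate_nil, pvLinesA]
  | cons p rest ih =>
      intro i t lines
      obtain ⟨text, dur⟩ := p
      simp [PySem.List.enumerate_cons, pvLinesA, srtA_step, ih]

theorem pvJoinBlock (a b c : List Char) (L : List (List Char)) :
    PySem.Chars.join ['\n'] (a :: b :: c :: [] :: L)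
      = PySem.Chars.join ['\n'] ((a ++ ['\n'] ++ b ++ ['\n'] ++ c ++ ['\n']) :: L) := by
  cases L with
  | nil => simp [PySem.Chars.join_cons_cons, PySem.Chars.join_singleton]
  | cons x xs => simp [PySem.Chars.join_cons_cons]

theorem pvJoinCongrTail (nl h : List Char) (L1 L2 : List (List Char))
    (hemp : L1 = [] ↔ L2 = [])
    (hj : PySem.Chars.join nl L1 = PySem.Chars.join nl L2) :
    PySem.Chars.join nl (h :: L1) = PySem.Chars.join nl (h :: L2) := by
  cases L1 with
  | nil =>
      have : L2 = [] := hemp.mp rfl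
      subst this; rfl
  | cons x xs =>
      cases L2 with
      | nil => simp at hemp
      | cons y ys =>
          rw [PySem.Chars.join_cons_cons, PySem.Chars.join_cons_cons, hj]

theorem pvJoinEq (pairs : List (String × Int)) :
    ∀ (i t : Int),
    PySem.Str.join "\n" (pvLinesA pairs i t) = PySem.Str.join "\n" (pvBlocksL pairs i t) := by
  induction pairs with
  | nil => intro i t; rfl
  | cons p rest ih =>
      intro i t
      obtain ⟨text, dur⟩ := p
      have ih' := congrArg String.toList (ih (i + 1) (t + dur))
      simp only [PySem.Str.toList_join] at ih'
      show String.ofList _ = String.ofList _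
      refine congrArg String.ofList ?_
      have hnl : ("\n" : String).toList = ['\n'] := rfl
      simp only [pvLinesA, pvBlocksL, List.map, hnl, String.toList_append]
      have hemp : "".toList = ([] : List Char) := rfl
      rw [hemp, pvJoinBlock]
      simp only [List.append_assoc]
      apply pvJoinCongrTail
      · constructor <;> intro h <;>
          (cases rest with
           | nil => rfl
           | cons q r => obtain ⟨tq, dq⟩ := q; simp [pvLinesA, pvBlocksL] at h)
      · simpa [hnl] using ih'
  

theorem pvBlocksEq (s : List String) :
    ∀ (d : List Int) (t : Int) (k : Nat),
    (List.range (min s.length d.length)).map (fun (j : Nat) =>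
      PySem.Int.toStr ((k : Int) + (j : Int) + 1) ++ "\n" ++
      pvFmt (((d.take (min s.length d.length)).scanl (· + ·) t).getD j 0) ++ " --> " ++
      pvFmt ((((d.take (min s.length d.length)).scanl (· + ·) t).getD j 0) + d.getD j 0) ++ "\n" ++
      s.getD j "" ++ "\n")
    = pvBlocksL (s.zip d) ((k : Int) + 1) t := by
  induction s with
  | nil => intro d t k; simp [pvBlocksL]
  | cons x s' ih =>
      intro d t k
      cases d with
      | nil => simp [pvBlocksL]
      | cons dur d' =>
          simp only [List.length_cons, Nat.succ_min_succ, List.take_succ_cons, List.scanl_cons,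
            List.range_succ_eq_map, List.map_cons, List.map_map, List.getD_cons_zero,
            List.zip_cons_cons, pvBlocksL]
          congr 1
          have hk : ((k : Int) + 1 + 1) = ((k + 1 : Nat) : Int) + 1 := by push_cast; ring
          rw [hk, ← ih d' (t + dur) (k + 1)]
          apply List.map_congr_left
          intro j hj
          simp only [Function.comp_apply, List.getD_cons_succ]
          have hcast : ((k : Int) + (Nat.succ j : Nat) + 1) = ((k + 1 : Nat) : Int) + (j : Int) + 1 := by
            push_cast; ring
          rw [hcast]


-- ===== VERDICT (by name: the statement is the Claim_ definition above) =====
theorem srt_from_durations_spec : Claim_equal_srt_from_durations := by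
  intro sentences durations_ms _
  unfold Spec_srt_from_durations srt_from_durations srt_from_durations_alt
  rw [pvFoldA, List.nil_append, pvJoinEq]
  have h := pvBlocksEq sentences durations_ms 0 0
  simp only [Int.ofNat_zero, zero_add] at h ⊢
  rw [← h]
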